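-- pv_equiv track=rewrite | github.com/akashvjagtap/CODECHECK2 | TagValueChange.py | _and_tristate
-- ===== SOURCE A (Python) =====
-- def _and_tristate(values):
--     saw_none = False
--     saw_true = False
--     for v in values:
--         if v is False:
--             return False
--         if v is None:
--             saw_none = True
--         elif v is True:
--             saw_true = True
--     if saw_none and not saw_true:
--         return None
--     if saw_none and saw_true:
--         return None
--     return True if saw_true else None
-- ===== SOURCE B (Python) =====
-- def _and_tristate(values):
--     vals = list(values)
--     if any(v is False for v in vals):
--         return False
--     if any(v is None for v in vals):
--         return None
--     if any(v is True for v in vals):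
--         return True
--     return None
-- ===== Notes on version B (the rewrite author's own statement) =====
-- stated objective: simpler
-- what changed: Replaced the single flag-accumulating loop with three short-circuiting any-scans in priority order (False, then None, then True).
import Mathlib
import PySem

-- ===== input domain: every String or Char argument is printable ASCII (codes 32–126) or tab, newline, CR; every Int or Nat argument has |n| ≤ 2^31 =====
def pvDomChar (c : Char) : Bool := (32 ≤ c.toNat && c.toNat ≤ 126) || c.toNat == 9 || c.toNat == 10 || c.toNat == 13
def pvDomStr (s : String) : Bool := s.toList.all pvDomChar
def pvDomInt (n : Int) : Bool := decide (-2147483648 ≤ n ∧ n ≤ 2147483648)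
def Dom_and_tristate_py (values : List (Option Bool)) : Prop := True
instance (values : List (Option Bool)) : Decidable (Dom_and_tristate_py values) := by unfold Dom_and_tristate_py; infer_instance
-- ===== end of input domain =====

-- B replaces A's single flag-accumulating loop with three short-circuiting priority scans; objective: simpler.

-- ===== PORT A =====
-- A's loop with its two flags saw_none/saw_true, transliterated as structural recursion.
def andTristateLoop : List (Option Bool) → Bool → Bool → Option Bool
  | [], sawNone, sawTrue =>
    if sawNone && !sawTrue then none
    else if sawNone && sawTrue then none
    else if sawTrue then some true else none
  | v :: rest, sawNone, sawTrue =>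
    if v = some false then some false
    else if v = none then andTristateLoop rest true sawTrue
    else if v = some true then andTristateLoop rest sawNone true
    else andTristateLoop rest sawNone sawTrue

def and_tristate_py (values : List (Option Bool)) : Option Bool :=
  andTristateLoop values false false

-- ===== PORT B =====
def and_tristate_py_alt (values : List (Option Bool)) : Option Bool :=
  if values.any (· = some false) then some false
  else if values.any (· = none) then none
  else if values.any (· = some true) then some true
  else none

-- ===== PRECONDITION & SPEC =====
def Spec_and_tristate_py (values : List (Option Bool)) (out : Option Bool) : Prop := out = and_tristate_py_alt values
instance (values : List (Option Bool)) (out : Option Bool) : Decidable (Spec_and_tristate_py values out) := by unfold Spec_and_tristate_py; infer_instance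

-- ===== CLAIM (what is proved, stated in full; the proofs are below) =====
def Claim_equal_and_tristate_py : Prop := ∀ (values : List (Option Bool)), Dom_and_tristate_py values → Spec_and_tristate_py values (and_tristate_py values)

-- ===== LEMMAS AND PROOFS =====

-- Characterisation of A's loop for arbitrary flag state.
theorem andTristateLoop_eq (vs : List (Option Bool)) (sn st : Bool) :
    andTristateLoop vs sn st =
      if vs.any (· = some false) then some false
      else if sn || vs.any (· = none) then none
      else if st || vs.any (· = some true) then some true
      else none := by
  induction vs generalizing sn st with
  | nil =>
    simp [andTristateLoop]
    cases sn <;> cases st <;> simp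
  | cons v rest ih =>
    cases v with
    | none => simp [andTristateLoop, ih]
    | some b =>
      cases b <;> simp [andTristateLoop, ih]

-- ===== VERDICT (by name: the statement is the Claim_ definition above) =====
theorem and_tristate_py_spec : Claim_equal_and_tristate_py := by
  intro values _
  unfold Spec_and_tristate_py and_tristate_py and_tristate_py_alt
  rw [andTristateLoop_eq]
  simp
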